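-- pv_equiv track=rewrite | github.com/mhvis/advent-of-code-2025 | day6/main.py | transpose_input
-- ===== SOURCE A (Python) =====
-- def transpose_input(lines: list[str]) -> list[str]:
--     """Transposes the columns in the input to rows *and discards whitespace*."""
--     columns = []  # type: list[str]
--     for line in lines:
--         for i in range(len(line)):
--             if len(columns) <= i:
--                 columns.append("")
--             if not line[i].isspace():
--                 columns[i] += line[i]
--     return columns
-- ===== SOURCE B (Python) =====
-- def transpose_input(lines: list[str]) -> list[str]:
--     """Transposes the columns in the input to rows *and discards whitespace*."""
--     width = max(map(len, lines), default=0)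
--     return [
--         "".join(line[i] for line in lines if i < len(line) and not line[i].isspace())
--         for i in range(width)
--     ]
-- ===== Notes on version B (the rewrite author's own statement) =====
-- stated objective: faster
-- what changed: Replaces the incremental row-major loop that grows and patches a columns list via repeated per-character string concatenation with a column-major transpose: compute the max line length once, then build each output column in one join over the non-whitespace characters of every line at that index.
import Mathlib
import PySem

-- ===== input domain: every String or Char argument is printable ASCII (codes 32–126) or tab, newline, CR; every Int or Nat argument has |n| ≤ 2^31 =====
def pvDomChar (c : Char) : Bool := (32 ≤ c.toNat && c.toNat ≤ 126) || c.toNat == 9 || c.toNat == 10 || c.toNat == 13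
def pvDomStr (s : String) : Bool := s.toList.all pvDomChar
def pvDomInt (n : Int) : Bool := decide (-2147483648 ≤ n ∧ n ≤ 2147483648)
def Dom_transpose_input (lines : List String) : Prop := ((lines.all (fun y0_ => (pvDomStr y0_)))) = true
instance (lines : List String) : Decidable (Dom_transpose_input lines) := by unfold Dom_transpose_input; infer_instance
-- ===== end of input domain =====

-- B replaces A's incremental cell-patching loop (repeated per-character string appends) with a
-- column-major transpose-then-filter building each column in one join; measured faster by the check.

-- ===== PORT A =====
-- Strings are handled on the List Char side (PySem convention); columns are kept as
-- List (List Char) during the loop and wrapped with String.ofList at the end.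
def transpose_input (lines : List String) : List String :=
  (lines.foldl
    (fun columns line =>
      (PySem.List.pyRange 0 (line.toList.length : Int) 1).foldl
        (fun cols i =>
          let cols := if (cols.length : Int) ≤ i then cols ++ [([] : List Char)] else cols
          if PySem.Chars.isspace (PySem.List.pyGetD line.toList i ' ') = false then
            PySem.List.pySetD cols i
              (PySem.List.pyGetD cols i [] ++ [PySem.List.pyGetD line.toList i ' '])
          else cols)
        columns)
    ([] : List (List Char))).map String.ofList

-- ===== PORT B =====
def transpose_input_alt (lines : List String) : List String :=
  let width := (lines.map (fun l => l.toList.length)).foldl max 0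
  (List.range width).map (fun i =>
    String.ofList ((lines.filterMap (fun line => getElem? line.toList i)).filter
      (fun c => !PySem.Chars.isspace c)))

-- ===== PRECONDITION & SPEC =====
def Spec_transpose_input (lines : List String) (out : List String) : Prop := out = transpose_input_alt lines
instance (lines : List String) (out : List String) : Decidable (Spec_transpose_input lines out) := by unfold Spec_transpose_input; infer_instance

-- ===== CLAIM (what is proved, stated in full; the proofs are below) =====
def Claim_equal_transpose_input : Prop := ∀ (lines : List String), Dom_transpose_input lines → Spec_transpose_input lines (transpose_input lines)

-- ===== LEMMAS AND PROOFS =====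

-- the characters line contributes to column i ([] when the line is short or the char is whitespace)
def pvFilt (line : List Char) (i : Nat) : List Char :=
  match getElem? line i with
  | some c => if PySem.Chars.isspace c then [] else [c]
  | none => []

-- Nat-level form of A's inner-loop body
def pvStep (line : List Char) (cols : List (List Char)) (k : Nat) : List (List Char) :=
  let cols := if cols.length ≤ k then cols ++ [([] : List Char)] else cols
  if PySem.Chars.isspace (line.getD k ' ') = false then
    cols.set k (cols.getD k [] ++ [line.getD k ' '])
  else cols

-- state of the columns after merging one line into cols up to index n
def pvMerge (cols : List (List Char)) (line : List Char) (n : Nat) : List (List Char) :=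
  (List.range (max cols.length n)).map
    (fun i => if i < n then cols.getD i [] ++ pvFilt line i else cols.getD i [])

theorem pv_map_range_getD (xs : List (List Char)) :
    (List.range xs.length).map (fun i => xs.getD i []) = xs := by
  apply List.ext_getElem
  · simp
  · intro i h1 h2
    simp [List.getD_eq_getElem?_getD, List.getElem?_eq_getElem h2]

theorem pv_step_merge (cols : List (List Char)) (line : List Char) (n : Nat)
    (hn : n < line.length) :
    pvStep line (pvMerge cols line n) n = pvMerge cols line (n + 1) := by
  have hget : line.getD n ' ' = getElem line n hn := by
    rw [List.getD_eq_getElem?_getD, List.getElem?_eq_getElem hn]; rfl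
  have hfl : pvFilt line n =
      if PySem.Chars.isspace (getElem line n hn) then [] else [getElem line n hn] := by
    simp [pvFilt, List.getElem?_eq_getElem hn]
  unfold pvStep pvMerge
  simp only [List.length_map, List.length_range, hget]
  by_cases hcl : cols.length ≤ n
  · have hm1 : max cols.length n = n := by omega
    have hm2 : max cols.length (n + 1) = n + 1 := by omega
    have hnone : getElem? cols n = none := List.getElem?_eq_none (by omega)
    have hcgd : cols.getD n [] = [] := by
      rw [List.getD_eq_getElem?_getD, hnone]; rfl
    have hmapeq : (List.range n).map
          (fun i => if i < n + 1 then cols.getD i [] ++ pvFilt line i else cols.getD i []) =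
        (List.range n).map
          (fun i => if i < n then cols.getD i [] ++ pvFilt line i else cols.getD i []) := by
      refine List.map_congr_left (fun i hi => ?_)
      have : i < n := List.mem_range.mp hi
      simp [this, Nat.lt_succ_of_lt this]
    rw [hm1, hm2, if_pos (le_refl n), List.range_succ, List.map_append, hmapeq,
        List.map_singleton]
    have hgd : ((List.range n).map
          (fun i => if i < n then cols.getD i [] ++ pvFilt line i else cols.getD i []) ++
          [([] : List Char)]).getD n [] = [] := by
      rw [List.getD_eq_getElem?_getD, List.getElem?_append_right (by simp)]
      simp
    rw [hgd]
    have hf'n : (if n < n + 1 then cols.getD n [] ++ pvFilt line n else cols.getD n []) =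
        pvFilt line n := by simp [List.getD_eq_getElem?_getD, hnone]
    rw [hf'n]
    split_ifs with hs
    · rw [List.set_append]
      simp only [List.length_map, List.length_range, Nat.lt_irrefl,
        Nat.sub_self]
      rw [hfl]
      simp at hs
      simp [hs]
    · rw [hfl]
      simp only [Bool.not_eq_false] at hs
      simp [hs]
  · have hcl2 : n < cols.length := by omega
    have hm1 : max cols.length n = cols.length := by omega
    have hm2 : max cols.length (n + 1) = cols.length := by omega
    rw [hm1, hm2]
    rw [if_neg hcl]
    have hMgd : ((List.range cols.length).map
          (fun i => if i < n then cols.getD i [] ++ pvFilt line i else cols.getD i [])).getD n [] =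
        cols.getD n [] := by
      rw [List.getD_eq_getElem?_getD, List.getElem?_map, List.getElem?_range hcl2]
      simp
    rw [hMgd]
    split_ifs with hs
    · apply List.ext_getElem
      · simp
      · intro j h1 h2
        simp only [List.length_set, List.length_map, List.length_range] at h1
        rw [List.getElem_set, List.getElem_map, List.getElem_map]
        simp only [List.getElem_range]
        by_cases hj : n = j
        · subst hj
          rw [if_pos rfl, if_pos (Nat.lt_succ_self n), hfl]
          simp at hs
          simp [hs]
        · rw [if_neg hj]
          by_cases hjn : j < n
          · simp [hjn, Nat.lt_succ_of_lt hjn]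
          · simp [hjn, show ¬ j < n + 1 by omega]
    · simp only [Bool.not_eq_false] at hs
      refine List.map_congr_left (fun i hi => ?_)
      by_cases hj : i = n
      · subst hj
        rw [hfl]
        simp [hs]
      · by_cases hin : i < n
        · simp [hin, Nat.lt_succ_of_lt hin]
        · simp [hin, show ¬ i < n + 1 by omega]

theorem pv_inner (line : List Char) (n : Nat) (hn : n ≤ line.length) (cols : List (List Char)) :
    (List.range n).foldl (pvStep line) cols = pvMerge cols line n := by
  induction n with
  | zero => simpa [pvMerge] using (pv_map_range_getD cols).symm
  | succ n ih =>
      rw [List.range_succ, List.foldl_append, ih (by omega)]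
      simpa using pv_step_merge cols line n (by omega)

theorem pv_merge_getD (cols : List (List Char)) (line : List Char) (i : Nat) :
    (pvMerge cols line line.length).getD i [] = cols.getD i [] ++ pvFilt line i := by
  unfold pvMerge
  rcases lt_or_ge i (max cols.length line.length) with h | h
  · rw [List.getD_eq_getElem?_getD, List.getElem?_map,
        List.getElem?_range h]
    by_cases hi : i < line.length
    · simp [hi]
    · have hnone : getElem? line i = none := List.getElem?_eq_none (by omega)
      simp [hi, pvFilt]
  · have h1 : getElem? ((List.range (max cols.length line.length)).map
        (fun i => if i < line.length then cols.getD i [] ++ pvFilt line i else cols.getD i [])) i = none :=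
      List.getElem?_eq_none (by simpa using h)
    have h2 : getElem? line i = none := List.getElem?_eq_none (by omega)
    have h3 : getElem? cols i = none := List.getElem?_eq_none (by omega)
    rw [List.getD_eq_getElem?_getD, h1, List.getD_eq_getElem?_getD, h3]
    simp [pvFilt, h2]

theorem pv_outer (ls : List (List Char)) (cols : List (List Char)) :
    ls.foldl (fun cs l => (List.range l.length).foldl (pvStep l) cs) cols =
      (List.range (ls.foldl (fun w l => max w l.length) cols.length)).map
        (fun i => cols.getD i [] ++ ls.flatMap (fun l => pvFilt l i)) := by
  induction ls generalizing cols with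
  | nil => simpa using (pv_map_range_getD cols).symm
  | cons l ls ih =>
      simp only [List.foldl_cons, pv_inner l l.length (le_refl _) cols, ih]
      have hlen : (pvMerge cols l l.length).length = max cols.length l.length := by
        simp [pvMerge]
      rw [hlen]
      refine List.map_congr_left (fun i _ => ?_)
      rw [pv_merge_getD]
      simp [List.append_assoc]

theorem pv_col_eq (lines : List String) (i : Nat) :
    (lines.map String.toList).flatMap (fun l => pvFilt l i) =
      (lines.filterMap (fun line => getElem? line.toList i)).filter (fun c => !PySem.Chars.isspace c) := by
  induction lines with
  | nil => rfl
  | cons l ls ih =>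
      simp only [List.map_cons, List.flatMap_cons, List.filterMap_cons, ih]
      cases h : getElem? l.toList i with
      | none => simp [pvFilt, h]
      | some c =>
          by_cases hs : PySem.Chars.isspace c <;> simp [pvFilt, h, hs]

-- bridge: literal Int-level port of A's fold over one line = the Nat-level fold
theorem pv_bridge (line : List Char) (cols : List (List Char)) :
    (PySem.List.pyRange 0 (line.length : Int) 1).foldl
        (fun cols i =>
          let cols := if (cols.length : Int) ≤ i then cols ++ [([] : List Char)] else cols
          if PySem.Chars.isspace (PySem.List.pyGetD line i ' ') = false then
            PySem.List.pySetD cols i (PySem.List.pyGetD cols i [] ++ [PySem.List.pyGetD line i ' '])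
          else cols)
        cols =
      (List.range line.length).foldl (pvStep line) cols := by
  rw [PySem.List.pyRange_one]
  simp only [Int.sub_zero, Int.toNat_natCast, List.foldl_map]
  refine PySem.List.foldl_congr_mem _ _ _ _ (fun cs k _ => ?_)
  simp [pvStep, PySem.List.pyGetD_natCast, PySem.List.pySetD_natCast, List.getD]

-- ===== VERDICT (by name: the statement is the Claim_ definition above) =====
theorem transpose_input_spec : Claim_equal_transpose_input := by
  intro lines _
  unfold Spec_transpose_input transpose_input transpose_input_alt
  have h1 : lines.foldl
      (fun columns line =>
        (PySem.List.pyRange 0 (line.toList.length : Int) 1).foldl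
          (fun cols i =>
            let cols := if (cols.length : Int) ≤ i then cols ++ [([] : List Char)] else cols
            if PySem.Chars.isspace (PySem.List.pyGetD line.toList i ' ') = false then
              PySem.List.pySetD cols i
                (PySem.List.pyGetD cols i [] ++ [PySem.List.pyGetD line.toList i ' '])
            else cols)
          columns)
      ([] : List (List Char)) =
      (lines.map String.toList).foldl
        (fun cs l => (List.range l.length).foldl (pvStep l) cs) ([] : List (List Char)) := by
    rw [List.foldl_map]
    refine PySem.List.foldl_congr_mem _ _ _ _ (fun cs line _ => ?_)
    exact pv_bridge line.toList cs
  rw [h1, pv_outer]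
  have hw : (lines.map String.toList).foldl (fun w l => max w l.length)
      ([] : List (List Char)).length = (lines.map (fun l => l.toList.length)).foldl max 0 := by
    simp [List.foldl_map]
  rw [hw, List.map_map]
  refine List.map_congr_left (fun i _ => ?_)
  simp [pv_col_eq]
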